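-- pv_equiv track=rewrite | github.com/dutch-26/sec-cyber-tracker | pipeline/sec_fetcher.py | extract_incident_description
-- ===== SOURCE A (Python) =====
-- def extract_incident_description(filing_text: str) -> str:
--     """
--     Extract the Item 1.05 section text from an 8-K document.
--     Returns the relevant text block, capped at 2500 chars.
--     """
--     if not filing_text:
--         return ""
--
--     text_lower = filing_text.lower()
--
--     # Find Item 1.05 start (handle non-breaking space variant)
--     start = -1
--     for marker in ["item 1.05", "item\xa01.05"]:
--         idx = text_lower.find(marker)
--         if idx != -1:
--             start = idx
--             break
--
--     if start == -1:
--         return ""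
--
--     # Find end at next Item heading
--     end = len(filing_text)
--     for em in ["item 2.", "item 3.", "item 4.", "item 5.",
--                "item 6.", "item 7.", "item 8.", "item 9."]:
--         idx = text_lower.find(em, start + 50)
--         if idx != -1 and idx < end:
--             end = idx
--
--     excerpt = filing_text[start:end].strip()
--     return excerpt[:2500] if len(excerpt) > 2500 else excerpt
-- ===== SOURCE B (Python) =====
-- def extract_incident_description(filing_text: str) -> str:
--     """
--     Extract the Item 1.05 section text from an 8-K document.
--     Single left-to-right scan for the next item heading instead of
--     eight separate full-text searches; returns the block capped at 2500 chars.
--     """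
--     if not filing_text:
--         return ""
--
--     text_lower = filing_text.lower()
--
--     start = text_lower.find("item 1.05")
--     if start == -1:
--         start = text_lower.find("item\xa01.05")
--     if start == -1:
--         return ""
--
--     n = len(filing_text)
--     end = n
--     i = start + 50
--     while i + 7 <= n:
--         seg = text_lower[i:i + 7]
--         if seg.startswith("item ") and "2" <= seg[5] <= "9" and seg[6] == ".":
--             end = i
--             break
--         i += 1
--
--     excerpt = filing_text[start:end].strip()
--     return excerpt[:2500]
-- ===== Notes on version B (the rewrite author's own statement) =====
-- stated objective: alternative
-- what changed: The end boundary is found by one left-to-right scan of the suffix that recognises in place any heading made of the word item, a space, a digit from 2 to 9 and a dot, instead of eight separate full-text find() passes (one per digit) whose minimum A then takes.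
import Mathlib
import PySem

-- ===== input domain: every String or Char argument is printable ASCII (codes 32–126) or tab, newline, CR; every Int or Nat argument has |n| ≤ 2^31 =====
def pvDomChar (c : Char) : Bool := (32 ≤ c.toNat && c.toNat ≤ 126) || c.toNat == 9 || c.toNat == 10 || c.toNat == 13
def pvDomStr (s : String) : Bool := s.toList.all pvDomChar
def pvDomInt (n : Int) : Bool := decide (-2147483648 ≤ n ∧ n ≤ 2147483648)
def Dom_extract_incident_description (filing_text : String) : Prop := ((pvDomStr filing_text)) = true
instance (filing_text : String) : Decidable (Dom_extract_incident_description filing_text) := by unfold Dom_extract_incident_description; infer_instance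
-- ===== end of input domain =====

-- B finds the end boundary by one left-to-right scan recognising any "item [2-9]." heading
-- in place, instead of A's eight separate find() passes; objective: alternative algorithm.

-- ===== PORT A =====
def pvMarkersA : List (List Char) :=
  ["item 2.".toList, "item 3.".toList, "item 4.".toList, "item 5.".toList,
   "item 6.".toList, "item 7.".toList, "item 8.".toList, "item 9.".toList]

-- A's first loop: `for marker in [...]: idx = find(marker); if idx != -1: start = idx; break`
def pvAStart (tl : List Char) : List (List Char) → Int
  | [] => -1
  | m :: ms => if PySem.Chars.find tl m ≠ -1 then PySem.Chars.find tl m else pvAStart tl ms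

-- A's second loop: `for em in [...]: idx = find(em, start+50); if idx != -1 and idx < end: end = idx`
def pvAEnd (tl : List Char) (k : Int) : List (List Char) → Int → Int
  | [], e => e
  | m :: ms, e =>
      pvAEnd tl k ms
        (if PySem.Chars.findFrom tl m k ≠ -1 ∧ PySem.Chars.findFrom tl m k < e
         then PySem.Chars.findFrom tl m k else e)

def extract_incident_description (filing_text : String) : String :=
  let cs := filing_text.toList
  if cs.isEmpty then "" else
  let tl := PySem.Chars.lower cs
  let start := pvAStart tl ["item 1.05".toList, "item\u00A01.05".toList]
  if start = -1 then "" else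
  let e := pvAEnd tl (start + 50) pvMarkersA (cs.length : Int)
  let excerpt := PySem.Chars.strip (PySem.Chars.slice cs (some start) (some e))
  if (excerpt.length : Int) > 2500 then String.ofList (PySem.Chars.slice excerpt none (some 2500))
  else String.ofList excerpt

-- ===== PORT B =====
-- B's check on one window: text_lower[i:i+7] starts with "item ", then a digit 2-9, then '.'
def pvBHit (tl : List Char) (i : Nat) : Bool :=
  let seg := PySem.Chars.slice tl (some (i : Int)) (some ((i : Int) + 7))
  PySem.Chars.startswith seg "item ".toList &&
    (('2' ≤ PySem.List.pyGetD seg 5 ' ' && PySem.List.pyGetD seg 5 ' ' ≤ '9') &&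
     PySem.List.pyGetD seg 6 ' ' == '.')

-- B's while loop: scan i upwards while i + 7 <= n; stop at the first hit, default n
def pvBScan (tl : List Char) (i : Nat) : Nat :=
  if i + 7 ≤ tl.length then
    if pvBHit tl i then i else pvBScan tl (i + 1)
  else tl.length
termination_by tl.length + 7 - i

def extract_incident_description_alt (filing_text : String) : String :=
  let cs := filing_text.toList
  if cs.isEmpty then "" else
  let tl := PySem.Chars.lower cs
  let s1 := PySem.Chars.find tl "item 1.05".toList
  let start := if s1 = -1 then PySem.Chars.find tl "item\u00A01.05".toList else s1
  if start = -1 then "" else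
  -- here start = a find result ≠ -1, hence start ≥ 0, so .toNat is exact
  let e := pvBScan tl (start + 50).toNat
  let excerpt := PySem.Chars.strip (PySem.Chars.slice cs (some start) (some (e : Int)))
  String.ofList (PySem.Chars.slice excerpt none (some 2500))

-- ===== PRECONDITION & SPEC =====
def Spec_extract_incident_description (filing_text : String) (out : String) : Prop := out = extract_incident_description_alt filing_text
instance (filing_text : String) (out : String) : Decidable (Spec_extract_incident_description filing_text out) := by unfold Spec_extract_incident_description; infer_instance

-- ===== CLAIM (what is proved, stated in full; the proofs are below) =====
def Claim_equal_extract_incident_description : Prop := ∀ (filing_text : String), Dom_extract_incident_description filing_text → Spec_extract_incident_description filing_text (extract_incident_description filing_text)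

-- ===== LEMMAS AND PROOFS =====

-- Occ tl j: one of the eight end markers occurs at position j
def pvOcc (tl : List Char) (j : Nat) : Prop := ∃ m ∈ pvMarkersA, m <+: tl.drop j

-- Good tl i e: e is the first position ≥ i where a marker occurs, or tl.length if none
def pvGood (tl : List Char) (i e : Nat) : Prop :=
  e ≤ tl.length ∧ (∀ j, i ≤ j → j < e → ¬ pvOcc tl j) ∧
    (e = tl.length ∨ (i ≤ e ∧ pvOcc tl e))

theorem pvGood_unique {tl : List Char} {i e1 e2 : Nat}
    (h1 : pvGood tl i e1) (h2 : pvGood tl i e2) : e1 = e2 := by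
  obtain ⟨hle1, hno1, hw1⟩ := h1
  obtain ⟨hle2, hno2, hw2⟩ := h2
  rcases Nat.lt_trichotomy e1 e2 with h | h | h
  · rcases hw1 with h' | ⟨hi, hocc⟩
    · omega
    · exact absurd hocc (hno2 e1 hi h)
  · exact h
  · rcases hw2 with h' | ⟨hi, hocc⟩
    · omega
    · exact absurd hocc (hno1 e2 hi h)

theorem pvMarker_len {m : List Char} (hm : m ∈ pvMarkersA) : m.length = 7 := by
  simp only [pvMarkersA, List.mem_cons, List.not_mem_nil, or_false] at hm
  rcases hm with h|h|h|h|h|h|h|h <;> subst h <;> decide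

theorem pvOcc_len {tl : List Char} {j : Nat} (h : pvOcc tl j) : j + 7 ≤ tl.length := by
  obtain ⟨m, hm, hp⟩ := h
  have := hp.length_le
  have := pvMarker_len hm
  have := List.length_drop (l := tl) (i := j)
  by_cases hj : j ≤ tl.length <;> omega

-- characterise pvOcc as a shape of tl.drop j
theorem pvOcc_iff (tl : List Char) (j : Nat) :
    pvOcc tl j ↔ ∃ c5 c6 rest, tl.drop j = 'i'::'t'::'e'::'m'::' '::c5::c6::rest ∧
      '2' ≤ c5 ∧ c5 ≤ '9' ∧ c6 = '.' := by
  constructor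
  · rintro ⟨m, hm, t, ht⟩
    simp only [pvMarkersA, List.mem_cons, List.not_mem_nil, or_false] at hm
    rcases hm with h|h|h|h|h|h|h|h <;> subst h
    · exact ⟨'2', '.', t, by simpa using ht.symm, by decide, by decide, rfl⟩
    · exact ⟨'3', '.', t, by simpa using ht.symm, by decide, by decide, rfl⟩
    · exact ⟨'4', '.', t, by simpa using ht.symm, by decide, by decide, rfl⟩
    · exact ⟨'5', '.', t, by simpa using ht.symm, by decide, by decide, rfl⟩
    · exact ⟨'6', '.', t, by simpa using ht.symm, by decide, by decide, rfl⟩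
    · exact ⟨'7', '.', t, by simpa using ht.symm, by decide, by decide, rfl⟩
    · exact ⟨'8', '.', t, by simpa using ht.symm, by decide, by decide, rfl⟩
    · exact ⟨'9', '.', t, by simpa using ht.symm, by decide, by decide, rfl⟩
  · rintro ⟨c5, c6, rest, hd, h2, h9, hdot⟩
    subst hdot
    have hlo : 50 ≤ c5.toNat := by rw [Char.le_def] at h2; exact h2
    have hhi : c5.toNat ≤ 57 := by rw [Char.le_def] at h9; exact h9
    have hn : c5.toNat = 50 ∨ c5.toNat = 51 ∨ c5.toNat = 52 ∨ c5.toNat = 53 ∨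
        c5.toNat = 54 ∨ c5.toNat = 55 ∨ c5.toNat = 56 ∨ c5.toNat = 57 := by omega
    have hc : c5 = '2' ∨ c5 = '3' ∨ c5 = '4' ∨ c5 = '5' ∨ c5 = '6' ∨ c5 = '7' ∨ c5 = '8' ∨ c5 = '9' := by
      rcases hn with h|h|h|h|h|h|h|h
      · exact Or.inl (Char.ext (UInt32.toNat_inj.mp h))
      · exact Or.inr (Or.inl (Char.ext (UInt32.toNat_inj.mp h)))
      · exact Or.inr (Or.inr (Or.inl (Char.ext (UInt32.toNat_inj.mp h))))
      · exact Or.inr (Or.inr (Or.inr (Or.inl (Char.ext (UInt32.toNat_inj.mp h)))))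
      · exact Or.inr (Or.inr (Or.inr (Or.inr (Or.inl (Char.ext (UInt32.toNat_inj.mp h))))))
      · exact Or.inr (Or.inr (Or.inr (Or.inr (Or.inr (Or.inl (Char.ext (UInt32.toNat_inj.mp h)))))))
      · exact Or.inr (Or.inr (Or.inr (Or.inr (Or.inr (Or.inr (Or.inl (Char.ext (UInt32.toNat_inj.mp h))))))))
      · exact Or.inr (Or.inr (Or.inr (Or.inr (Or.inr (Or.inr (Or.inr (Char.ext (UInt32.toNat_inj.mp h))))))))
    rcases hc with h|h|h|h|h|h|h|h <;> subst h
    · exact ⟨['i','t','e','m',' ','2','.'], by decide, rest, hd.symm⟩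
    · exact ⟨['i','t','e','m',' ','3','.'], by decide, rest, hd.symm⟩
    · exact ⟨['i','t','e','m',' ','4','.'], by decide, rest, hd.symm⟩
    · exact ⟨['i','t','e','m',' ','5','.'], by decide, rest, hd.symm⟩
    · exact ⟨['i','t','e','m',' ','6','.'], by decide, rest, hd.symm⟩
    · exact ⟨['i','t','e','m',' ','7','.'], by decide, rest, hd.symm⟩
    · exact ⟨['i','t','e','m',' ','8','.'], by decide, rest, hd.symm⟩
    · exact ⟨['i','t','e','m',' ','9','.'], by decide, rest, hd.symm⟩

theorem pvList7 {l : List Char} (h : 7 ≤ l.length) :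
    ∃ a b c d e f g t, l = a::b::c::d::e::f::g::t := by
  rcases l with _|⟨a,l⟩; · simp at h
  rcases l with _|⟨b,l⟩; · simp at h
  rcases l with _|⟨c,l⟩; · simp at h
  rcases l with _|⟨d,l⟩; · simp at h
  rcases l with _|⟨e,l⟩; · simp at h
  rcases l with _|⟨f,l⟩; · simp at h
  rcases l with _|⟨g,l⟩; · simp at h
  exact ⟨a,b,c,d,e,f,g,l,rfl⟩

theorem pvBHit_iff {tl : List Char} {i : Nat} (h : i + 7 ≤ tl.length) :
    pvBHit tl i = true ↔ pvOcc tl i := by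
  have hl : 7 ≤ (tl.drop i).length := by rw [List.length_drop]; omega
  obtain ⟨a,b,c,d,e,f,g,t,h7⟩ := pvList7 hl
  have hcast : ((i : Int) + 7) = ((i + 7 : Nat) : Int) := by push_cast; ring
  have hseg : PySem.Chars.slice tl (some (i : Int)) (some ((i : Int) + 7)) = [a,b,c,d,e,f,g] := by
    rw [PySem.Chars.slice_eq_listSlice, hcast, PySem.List.slice_natCast]
    have h2 : i + 7 - i = 7 := by omega
    rw [h2, h7]
    rfl
  have h5 : PySem.List.pyGetD [a,b,c,d,e,f,g] 5 ' ' = f := by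
    rw [PySem.List.pyGetD_ofNat']; rfl
  have h6 : PySem.List.pyGetD [a,b,c,d,e,f,g] 6 ' ' = g := by
    rw [PySem.List.pyGetD_ofNat']; rfl
  have hit : "item ".toList = ['i','t','e','m',' '] := by decide
  rw [pvOcc_iff]
  simp only [pvBHit, hseg, h5, h6, Bool.and_eq_true, decide_eq_true_eq, beq_iff_eq,
    PySem.Chars.startswith_iff, hit, List.cons_prefix_cons, List.nil_prefix, and_true, h7]
  constructor
  · rintro ⟨⟨ha,hb,hc,hd,he⟩, ⟨⟨h2,h9⟩, hg⟩⟩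
    exact ⟨f, g, t, by simp [← ha, ← hb, ← hc, ← hd, ← he], h2, h9, hg⟩
  · rintro ⟨c5, c6, rest, hdr, h2, h9, hdot⟩
    simp only [List.cons.injEq] at hdr
    obtain ⟨ha,hb,hc,hd,he,hf,hg,ht⟩ := hdr
    subst ha hb hc hd he hf hg hdot
    exact ⟨⟨rfl,rfl,rfl,rfl,rfl⟩, ⟨h2,h9⟩, rfl⟩

theorem pvBScan_good (tl : List Char) (i : Nat) : pvGood tl i (pvBScan tl i) := by
  fun_induction pvBScan tl i with
  | case1 i h hhit =>
    refine ⟨by omega, fun j h1 h2 => by omega, Or.inr ⟨le_refl _, ?_⟩⟩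
    exact (pvBHit_iff h).mp hhit
  | case2 i h hhit ih =>
    obtain ⟨hle, hno, hw⟩ := ih
    refine ⟨hle, fun j h1 h2 hocc => ?_, ?_⟩
    · rcases Nat.eq_or_lt_of_le h1 with rfl | hlt
      · exact absurd ((pvBHit_iff h).mpr hocc) (by simp [hhit])
      · exact hno j hlt h2 hocc
    · rcases hw with h' | ⟨h1, h2⟩
      · exact Or.inl h'
      · exact Or.inr ⟨by omega, h2⟩
  | case3 i h =>
    refine ⟨le_refl _, fun j h1 h2 hocc => ?_, Or.inl rfl⟩
    have := pvOcc_len hocc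
    omega

-- ff tl k m: first occurrence of m at/after k as a Nat, default tl.length
def pvFF (tl : List Char) (k : Int) (m : List Char) : Nat :=
  if PySem.Chars.findFrom tl m k = -1 then tl.length else (PySem.Chars.findFrom tl m k).toNat

def pvMS (tl : List Char) (k : Int) (ms : List (List Char)) : Nat :=
  ms.foldr (fun m acc => min (pvFF tl k m) acc) tl.length

theorem pvMS_cons (tl : List Char) (k : Int) (m : List Char) (ms : List (List Char)) :
    pvMS tl k (m :: ms) = min (pvFF tl k m) (pvMS tl k ms) := rfl

theorem pvMS_le_len (tl : List Char) (k : Int) (ms : List (List Char)) :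
    pvMS tl k ms ≤ tl.length := by
  induction ms with
  | nil => simp [pvMS]
  | cons m ms ih => exact le_trans (min_le_right _ _) ih

-- facts about one findFrom call on a marker (length-7 pattern), k within range
theorem pvFF_facts {tl m : List Char} {kN : Nat} (hk : kN ≤ tl.length) (hm7 : m.length = 7)
    (hne : PySem.Chars.findFrom tl m (kN : Int) ≠ -1) :
    (kN : Int) ≤ PySem.Chars.findFrom tl m (kN : Int) ∧
    (PySem.Chars.findFrom tl m (kN : Int)).toNat + 7 ≤ tl.length ∧
    m <+: tl.drop (PySem.Chars.findFrom tl m (kN : Int)).toNat ∧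
    (∀ i, kN ≤ i → i < (PySem.Chars.findFrom tl m (kN : Int)).toNat → ¬ m <+: tl.drop i) := by
  obtain ⟨h1, h2, h3⟩ := PySem.Chars.findFrom_natCast_spec tl m kN hk hne
  refine ⟨h1, ?_, h2, h3⟩
  have := h2.length_le
  rw [List.length_drop] at this
  omega

theorem pvAEnd_eq_pvMS (tl : List Char) (kN : Nat) (hk : kN ≤ tl.length)
    (ms : List (List Char)) (hms : ∀ m ∈ ms, m ∈ pvMarkersA) (e : Int)
    (he0 : 0 ≤ e) (hen : e ≤ (tl.length : Int)) :
    pvAEnd tl (kN : Int) ms e = ((min e.toNat (pvMS tl (kN : Int) ms) : Nat) : Int) := by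
  induction ms generalizing e with
  | nil =>
    simp only [pvAEnd, pvMS, List.foldr_nil]
    omega
  | cons m ms ih =>
    have hm7 : m.length = 7 := pvMarker_len (hms m (by simp))
    have hms' : ∀ m' ∈ ms, m' ∈ pvMarkersA := fun m' h' => hms m' (by simp [h'])
    simp only [pvAEnd, pvMS_cons]
    have hmsle : pvMS tl (kN : Int) ms ≤ tl.length := pvMS_le_len tl (kN : Int) ms
    by_cases hne : PySem.Chars.findFrom tl m (kN : Int) = -1
    · simp only [hne, ne_eq, not_true_eq_false, false_and, if_false]
      rw [ih hms' e he0 hen, pvFF]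
      simp only [hne, if_true]
      congr 1
      omega
    · obtain ⟨hge, hlen, _, _⟩ := pvFF_facts hk hm7 hne
      set f := PySem.Chars.findFrom tl m (kN : Int) with hf
      have he'0 : (0:Int) ≤ if f ≠ -1 ∧ f < e then f else e := by split_ifs <;> omega
      have he'n : (if f ≠ -1 ∧ f < e then f else e) ≤ (tl.length : Int) := by
        split_ifs <;> omega
      rw [ih hms' _ he'0 he'n, pvFF]
      simp only [hf]
      congr 1
      split_ifs with hcond
      · omega
      · simp only [ne_eq] at hcond
        omega

theorem pvMS_mem_le (tl : List Char) (k : Int) {m : List Char} {ms : List (List Char)}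
    (hm : m ∈ ms) : pvMS tl k ms ≤ pvFF tl k m := by
  induction ms with
  | nil => simp at hm
  | cons m' ms ih =>
    rcases List.mem_cons.mp hm with rfl | hm'
    · exact min_le_left _ _
    · exact le_trans (min_le_right _ _) (ih hm')

theorem pvMS_attained (tl : List Char) (k : Int) (ms : List (List Char))
    (h : pvMS tl k ms < tl.length) : ∃ m ∈ ms, pvFF tl k m = pvMS tl k ms := by
  induction ms with
  | nil => simp [pvMS] at h
  | cons m ms ih =>
    simp only [pvMS_cons] at h ⊢
    rcases Nat.lt_or_ge (pvMS tl k ms) (pvFF tl k m) with hlt | hle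
    · obtain ⟨m', hm', he⟩ := ih (by omega)
      exact ⟨m', by simp [hm'], by omega⟩
    · exact ⟨m, by simp, by omega⟩

theorem pvMS_good (tl : List Char) (kN : Nat) (hk : kN ≤ tl.length) :
    pvGood tl kN (pvMS tl (kN : Int) pvMarkersA) := by
  refine ⟨pvMS_le_len tl (kN : Int) pvMarkersA, fun j h1 h2 hocc => ?_, ?_⟩
  · obtain ⟨m, hm, hp⟩ := hocc
    have hm7 : m.length = 7 := pvMarker_len hm
    have hinf : m <:+: tl.drop kN := by
      have hdd : tl.drop j = (tl.drop kN).drop (j - kN) := by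
        rw [List.drop_drop]; congr 1; omega
      exact List.IsInfix.trans hp.isInfix (by rw [hdd]; exact (List.drop_suffix _ _).isInfix)
    have hne : PySem.Chars.findFrom tl m (kN : Int) ≠ -1 := by
      rw [ne_eq, PySem.Chars.findFrom_natCast_eq_neg_one_iff tl m kN hk]
      simpa using hinf
    obtain ⟨hge, hlen, hpre, hmin⟩ := pvFF_facts hk hm7 hne
    have hffle : pvFF tl (kN : Int) m ≤ j := by
      rw [pvFF, if_neg hne]
      by_contra hcon
      exact hmin j h1 (by omega) hp
    have := pvMS_mem_le tl (kN : Int) hm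
    omega
  · rcases eq_or_lt_of_le (pvMS_le_len tl (kN : Int) pvMarkersA) with heq | hlt
    · exact Or.inl heq
    · obtain ⟨m, hm, he⟩ := pvMS_attained tl (kN : Int) pvMarkersA hlt
      have hm7 : m.length = 7 := pvMarker_len hm
      have hne : PySem.Chars.findFrom tl m (kN : Int) ≠ -1 := by
        intro hcon
        rw [pvFF, if_pos hcon] at he
        omega
      obtain ⟨hge, hlen, hpre, hmin⟩ := pvFF_facts hk hm7 hne
      rw [pvFF, if_neg hne] at he
      refine Or.inr ⟨by omega, m, hm, by rw [← he]; exact hpre⟩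

theorem pvFindFrom_of_gt (tl m : List Char) (k : Int) (h : (tl.length : Int) < k) :
    PySem.Chars.findFrom tl m k = -1 := by
  simp only [PySem.Chars.findFrom]
  have : ¬ k < 0 := by omega
  simp [this]
  omega

theorem pvAEnd_const (tl : List Char) (k : Int) (ms : List (List Char))
    (h : ∀ m ∈ ms, PySem.Chars.findFrom tl m k = -1) (e : Int) :
    pvAEnd tl k ms e = e := by
  induction ms generalizing e with
  | nil => rfl
  | cons m ms ih =>
    simp only [pvAEnd, h m (by simp), ne_eq, not_true_eq_false, false_and, if_false]
    exact ih (fun m' h' => h m' (by simp [h'])) e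

-- the central fact: A's eight-find minimum equals B's single scan
theorem pvEnd_eq (tl : List Char) (start : Int) (hs : 0 ≤ start) :
    pvAEnd tl (start + 50) pvMarkersA (tl.length : Int) =
      ((pvBScan tl (start + 50).toNat : Nat) : Int) := by
  have hk : start + 50 = (((start + 50).toNat : Nat) : Int) := by omega
  set kN := (start + 50).toNat with hkN
  rcases Nat.lt_or_ge tl.length kN with hgt | hle
  · have hall : ∀ m ∈ pvMarkersA, PySem.Chars.findFrom tl m (start + 50) = -1 :=
      fun m _ => pvFindFrom_of_gt tl m _ (by omega)
    rw [pvAEnd_const tl _ pvMarkersA hall]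
    rw [pvBScan, if_neg (by omega)]
  · rw [hk, pvAEnd_eq_pvMS tl kN hle pvMarkersA (fun m h => h) (tl.length : Int) (by omega) (by omega)]
    have h1 : pvMS tl (kN : Int) pvMarkersA ≤ tl.length := pvMS_le_len _ _ _
    have h2 : min (tl.length : Int).toNat (pvMS tl (kN : Int) pvMarkersA) = pvMS tl (kN : Int) pvMarkersA := by
      omega
    rw [h2, pvGood_unique (pvMS_good tl kN hle) (pvBScan_good tl kN)]

theorem extract_incident_description_spec' (filing_text : String) :
    extract_incident_description filing_text = extract_incident_description_alt filing_text := by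
  simp only [extract_incident_description, extract_incident_description_alt]
  by_cases hemp : filing_text.toList.isEmpty
  · simp [hemp]
  · simp only [hemp, Bool.false_eq_true, if_false]
    set cs := filing_text.toList with hcs
    set tl := PySem.Chars.lower cs with htl
    have hlen : cs.length = tl.length := by
      rw [htl, PySem.Chars.lower, List.length_map]
    set f1 := PySem.Chars.find tl "item 1.05".toList with hf1
    set f2 := PySem.Chars.find tl "item\u00A01.05".toList with hf2
    have hstart_eq : pvAStart tl ["item 1.05".toList, "item\u00A01.05".toList] =
        (if f1 = -1 then f2 else f1) := by
      simp only [pvAStart, ← hf1, ← hf2]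
      by_cases h1 : f1 = -1 <;> by_cases h2 : f2 = -1 <;> simp [h1, h2]
    rw [hstart_eq]
    set start := if f1 = -1 then f2 else f1 with hstart
    by_cases hs0 : start = -1
    · simp [hs0]
    · simp only [hs0, if_false]
      have hsge : 0 ≤ start := by
        have hb1 := PySem.Chars.neg_one_le_find tl "item 1.05".toList
        have hb2 := PySem.Chars.neg_one_le_find tl "item\u00A01.05".toList
        rw [hstart]; split_ifs with h <;> [rw [← hf2] at hb2; rw [← hf1] at hb1] <;>
          [skip; skip] <;> omega
      rw [hlen, pvEnd_eq tl start hsge]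
      set x := PySem.Chars.strip (PySem.Chars.slice cs (some start)
        (some ((pvBScan tl (start + 50).toNat : Nat) : Int)))
      have hsl : PySem.Chars.slice x none (some 2500) = x.take 2500 := by
        rw [PySem.Chars.slice_eq_listSlice, PySem.List.slice_to x (by norm_num)]
        norm_num
        omega
      split_ifs with hlong
      · rfl
      · rw [hsl, List.take_of_length_le (by omega)]

-- ===== VERDICT (by name: the statement is the Claim_ definition above) =====
theorem extract_incident_description_spec : Claim_equal_extract_incident_description := by
  intro s _
  exact extract_incident_description_spec' s
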